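-- pv_equiv track=rewrite | github.com/the-vampiire/sqlit | sqlit/domains/query/app/multi_statement.py | _split_by_semicolons
-- ===== SOURCE A (Python) =====
-- def _split_by_semicolons(sql: str) -> list[str]:
--     """Split SQL by semicolons, respecting string literals."""
--     statements = []
--     current = []
--     in_single_quote = False
--     in_double_quote = False
--     i = 0
--
--     while i < len(sql):
--         char = sql[i]
--
--         # Handle escape sequences in strings
--         if i + 1 < len(sql) and char == "\\" and (in_single_quote or in_double_quote):
--             current.append(char)
--             current.append(sql[i + 1])
--             i += 2
--             continue
--
--         # Handle doubled quotes (SQL escape for quotes)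
--         if char == "'" and i + 1 < len(sql) and sql[i + 1] == "'" and in_single_quote:
--             current.append("''")
--             i += 2
--             continue
--
--         if char == '"' and i + 1 < len(sql) and sql[i + 1] == '"' and in_double_quote:
--             current.append('""')
--             i += 2
--             continue
--
--         # Toggle quote state
--         if char == "'" and not in_double_quote:
--             in_single_quote = not in_single_quote
--             current.append(char)
--         elif char == '"' and not in_single_quote:
--             in_double_quote = not in_double_quote
--             current.append(char)
--         elif char == ";" and not in_single_quote and not in_double_quote:
--             # End of statement
--             stmt = "".join(current).strip()
--             if stmt:
--                 statements.append(stmt)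
--             current = []
--         else:
--             current.append(char)
--
--         i += 1
--
--     # Don't forget the last statement (may not end with semicolon)
--     stmt = "".join(current).strip()
--     if stmt:
--         statements.append(stmt)
--
--     return statements
-- ===== SOURCE B (Python) =====
-- def _split_by_semicolons(sql: str) -> list[str]:
--     """Split SQL by semicolons, respecting string literals.
--
--     One scan records the indices of separating semicolons; the statements are
--     then sliced straight out of the original string (no char-by-char copying).
--     """
--     n = len(sql)
--     bounds = []
--     in_single_quote = False
--     in_double_quote = False
--     i = 0
--     while i < n:
--         c = sql[i]
--         if i + 1 < n and (
--             (c == "\\" and (in_single_quote or in_double_quote))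
--             or (c == "'" and sql[i + 1] == "'" and in_single_quote)
--             or (c == '"' and sql[i + 1] == '"' and in_double_quote)
--         ):
--             i += 2
--             continue
--         if c == "'" and not in_double_quote:
--             in_single_quote = not in_single_quote
--         elif c == '"' and not in_single_quote:
--             in_double_quote = not in_double_quote
--         elif c == ";" and not in_single_quote and not in_double_quote:
--             bounds.append(i)
--         i += 1
--     statements = []
--     prev = 0
--     for b in bounds + [n]:
--         stmt = sql[prev:b].strip()
--         if stmt:
--             statements.append(stmt)
--         prev = b + 1
--     return statements
-- ===== Notes on version B (the rewrite author's own statement) =====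
-- stated objective: simpler
-- what changed: B records the indices of separating semicolons in one scan of the quote state machine and then slices the statements straight out of the original string, instead of A's character-by-character appending into a growing buffer that is joined at each semicolon.
import Mathlib
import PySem

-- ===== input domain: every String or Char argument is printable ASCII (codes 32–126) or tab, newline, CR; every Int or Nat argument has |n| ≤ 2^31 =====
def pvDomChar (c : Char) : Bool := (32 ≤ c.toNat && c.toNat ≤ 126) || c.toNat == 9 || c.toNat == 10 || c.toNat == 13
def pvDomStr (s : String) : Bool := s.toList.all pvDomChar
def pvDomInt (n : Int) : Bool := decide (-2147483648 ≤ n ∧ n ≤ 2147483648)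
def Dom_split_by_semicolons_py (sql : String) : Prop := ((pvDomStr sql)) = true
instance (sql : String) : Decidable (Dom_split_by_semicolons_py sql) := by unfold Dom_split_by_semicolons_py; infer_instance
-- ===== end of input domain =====

-- B splits the string by recording semicolon boundary indices in one scan and slicing,
-- instead of A's char-by-char accumulation; objective: simpler (no copying of characters).

-- ===== PORT A =====
-- A's while-loop: state (in_single_quote, in_double_quote, current, statements), consuming chars
def aLoop : List Char → Bool → Bool → List Char → List String → List String
  | [], _, _, cur, acc =>
      let stmt := PySem.Str.strip (String.ofList cur)
      if stmt = "" then acc else acc ++ [stmt]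
  | c :: cs, s, d, cur, acc =>
      if cs ≠ [] ∧ c = '\\' ∧ (s = true ∨ d = true) then
        aLoop cs.tail s d (cur ++ [c] ++ cs.take 1) acc
      else if c = '\'' ∧ cs.head? = some '\'' ∧ s = true then
        aLoop cs.tail s d (cur ++ ['\'', '\'']) acc
      else if c = '"' ∧ cs.head? = some '"' ∧ d = true then
        aLoop cs.tail s d (cur ++ ['"', '"']) acc
      else if c = '\'' ∧ d = false then
        aLoop cs (!s) d (cur ++ [c]) acc
      else if c = '"' ∧ s = false then
        aLoop cs s (!d) (cur ++ [c]) acc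
      else if c = ';' ∧ s = false ∧ d = false then
        let stmt := PySem.Str.strip (String.ofList cur)
        aLoop cs s d [] (if stmt = "" then acc else acc ++ [stmt])
      else
        aLoop cs s d (cur ++ [c]) acc
  termination_by cs _ _ _ _ => cs.length
  decreasing_by all_goals (simp [List.length_tail]; try omega)

def split_by_semicolons_py (sql : String) : List String :=
  aLoop sql.toList false false [] []

-- ===== PORT B =====
-- B's first scan: same quote state machine, but only records indices of separating ';'
def bBounds : List Char → Bool → Bool → Nat → List Nat
  | [], _, _, _ => []
  | c :: cs, s, d, i =>
      if cs ≠ [] ∧ ((c = '\\' ∧ (s = true ∨ d = true))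
            ∨ (c = '\'' ∧ cs.head? = some '\'' ∧ s = true)
            ∨ (c = '"' ∧ cs.head? = some '"' ∧ d = true)) then
        bBounds cs.tail s d (i + 2)
      else if c = '\'' ∧ d = false then bBounds cs (!s) d (i + 1)
      else if c = '"' ∧ s = false then bBounds cs s (!d) (i + 1)
      else if c = ';' ∧ s = false ∧ d = false then i :: bBounds cs s d (i + 1)
      else bBounds cs s d (i + 1)
  termination_by cs _ _ _ => cs.length
  decreasing_by all_goals (simp [List.length_tail]; try omega)

-- B's second loop: 'for b in bounds + [n]: stmt = sql[prev:b].strip(); …; prev = b + 1'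
def bEmit (xs : List Char) : List Nat → Nat → List String → List String
  | [], _, acc => acc
  | b :: bs, prev, acc =>
      let stmt := PySem.Str.strip (String.ofList (PySem.List.slice xs (some (prev : Int)) (some (b : Int))))
      bEmit xs bs (b + 1) (if stmt = "" then acc else acc ++ [stmt])

def split_by_semicolons_py_alt (sql : String) : List String :=
  let xs := sql.toList
  bEmit xs (bBounds xs false false 0 ++ [xs.length]) 0 []

-- ===== PRECONDITION & SPEC =====
def Spec_split_by_semicolons_py (sql : String) (out : List String) : Prop := out = split_by_semicolons_py_alt sql
instance (sql : String) (out : List String) : Decidable (Spec_split_by_semicolons_py sql out) := by unfold Spec_split_by_semicolons_py; infer_instance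

-- ===== CLAIM (what is proved, stated in full; the proofs are below) =====
def Claim_equal_split_by_semicolons_py : Prop := ∀ (sql : String), Dom_split_by_semicolons_py sql → Spec_split_by_semicolons_py sql (split_by_semicolons_py sql)

-- ===== LEMMAS AND PROOFS =====

-- one char of the original string appended to the running slice
theorem take_snoc (xs : List Char) (prev i : Nat) (c : Char) (rest : List Char)
    (hdrop : xs.drop i = c :: rest) (hpi : prev ≤ i) :
    (xs.drop prev).take (i + 1 - prev) = (xs.drop prev).take (i - prev) ++ [c] := by
  have hx : (xs.drop prev)[i - prev]? = some c := by
    rw [List.getElem?_drop, show prev + (i - prev) = i from by omega,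
        show xs[i]? = (xs.drop i)[0]? from by rw [List.getElem?_drop]; simp, hdrop]
    simp
  rw [show i + 1 - prev = (i - prev) + 1 from by omega, List.take_add_one, hx]
  simp

-- the main loop invariant: B's bounds-then-slice emission equals A's accumulate-and-emit,
-- where A's 'current' is the slice of the original from prev to the scan position i
theorem key (m : Nat) : ∀ (cs : List Char) (s d : Bool) (i prev : Nat) (xs : List Char)
    (acc : List String), cs.length ≤ m → cs = xs.drop i → prev ≤ i → i ≤ xs.length →
    bEmit xs (bBounds cs s d i ++ [xs.length]) prev acc
      = aLoop cs s d ((xs.drop prev).take (i - prev)) acc := by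
  induction m with
  | zero =>
    intro cs s d i prev xs acc hm h h1 h2
    have hcs : cs = [] := List.length_eq_zero_iff.mp (Nat.le_zero.mp hm)
    subst hcs
    have hi : i = xs.length := by
      have := congrArg List.length h; simp at this; omega
    subst hi
    simp [bBounds, bEmit, aLoop, PySem.List.slice_natCast]
  | succ m ih =>
    intro cs s d i prev xs acc hm h h1 h2
    cases cs with
    | nil =>
      have hi : i = xs.length := by
        have := congrArg List.length h; simp at this; omega
      subst hi
      simp [bBounds, bEmit, aLoop, PySem.List.slice_natCast]
    | cons c cs' =>
      have hdrop : xs.drop i = c :: cs' := h.symm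
      have hlen : xs.length - i = cs'.length + 1 := by
        have := congrArg List.length hdrop; simpa using this
      have hi : i < xs.length := by omega
      have htail : xs.drop (i + 1) = cs' := by
        rw [← List.tail_drop, hdrop]; rfl
      have hcur : (xs.drop prev).take (i + 1 - prev)
          = (xs.drop prev).take (i - prev) ++ [c] := take_snoc xs prev i c cs' hdrop h1
      by_cases hskip : cs' ≠ [] ∧ ((c = '\\' ∧ (s = true ∨ d = true))
            ∨ (c = '\'' ∧ cs'.head? = some '\'' ∧ s = true)
            ∨ (c = '"' ∧ cs'.head? = some '"' ∧ d = true))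
      · -- skip-two branch on both sides
        obtain ⟨hne, hC⟩ := hskip
        obtain ⟨c2, rest2, hcs'⟩ : ∃ c2 rest2, cs' = c2 :: rest2 := by
          cases cs' with
          | nil => exact absurd rfl hne
          | cons a b => exact ⟨a, b, rfl⟩
        subst hcs'
        have htail2 : xs.drop (i + 2) = rest2 := by
          rw [show i + 2 = (i + 1) + 1 from rfl, ← List.tail_drop, htail]; rfl
        have hi2 : i + 2 ≤ xs.length := by simp at hlen; omega
        have hdrop1 : xs.drop (i + 1) = c2 :: rest2 := htail
        have hcur2 : (xs.drop prev).take (i + 2 - prev)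
            = (xs.drop prev).take (i - prev) ++ [c] ++ [c2] := by
          rw [show i + 2 - prev = (i + 1) + 1 - prev from by omega,
              take_snoc xs prev (i + 1) c2 rest2 hdrop1 (by omega), hcur]
        have hrec := ih rest2 s d (i + 2) prev xs acc
          (by simp at hm ⊢; omega) htail2.symm (by omega) hi2
        have hB : bBounds (c :: c2 :: rest2) s d i = bBounds rest2 s d (i + 2) := by
          rw [bBounds]
          simp only [List.tail_cons]
          rw [if_pos ⟨by simp, hC⟩]
        rw [hB]
        rcases hC with ⟨hc, hsd⟩ | ⟨hc, hc2, hs⟩ | ⟨hc, hc2, hd⟩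
        · rw [aLoop, if_pos ⟨by simp, hc, hsd⟩]
          simpa [hcur2] using hrec
        · simp only [List.head?_cons, Option.some.injEq] at hc2
          subst hc; subst hc2; subst hs
          rw [aLoop]
          rw [if_neg (by simp), if_pos ⟨rfl, rfl, rfl⟩]
          simpa [hcur2] using hrec
        · simp only [List.head?_cons, Option.some.injEq] at hc2
          subst hc; subst hc2; subst hd
          rw [aLoop]
          rw [if_neg (by simp), if_neg (by simp), if_pos ⟨rfl, rfl, rfl⟩]
          simpa [hcur2] using hrec
      · -- one-char branches: the three A skip-conditions are all false
        have hA1 : ¬ (cs' ≠ [] ∧ c = '\\' ∧ (s = true ∨ d = true)) := by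
          intro ⟨hne, hc, hsd⟩; exact hskip ⟨hne, Or.inl ⟨hc, hsd⟩⟩
        have hA2 : ¬ (c = '\'' ∧ cs'.head? = some '\'' ∧ s = true) := by
          intro ⟨hc, hc2, hs⟩
          have hne : cs' ≠ [] := by cases cs' <;> simp_all
          exact hskip ⟨hne, Or.inr (Or.inl ⟨hc, hc2, hs⟩)⟩
        have hA3 : ¬ (c = '"' ∧ cs'.head? = some '"' ∧ d = true) := by
          intro ⟨hc, hc2, hd⟩
          have hne : cs' ≠ [] := by cases cs' <;> simp_all
          exact hskip ⟨hne, Or.inr (Or.inr ⟨hc, hc2, hd⟩)⟩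
        rw [aLoop, if_neg hA1, if_neg hA2, if_neg hA3]
        have hBu : bBounds (c :: cs') s d i
            = if c = '\'' ∧ d = false then bBounds cs' (!s) d (i + 1)
              else if c = '"' ∧ s = false then bBounds cs' s (!d) (i + 1)
              else if c = ';' ∧ s = false ∧ d = false then i :: bBounds cs' s d (i + 1)
              else bBounds cs' s d (i + 1) := by
          rw [bBounds, if_neg hskip]
        rw [hBu]
        have hm' : cs'.length ≤ m := by simp at hm; omega
        by_cases hq1 : c = '\'' ∧ d = false
        · rw [if_pos hq1, if_pos hq1]
          have hrec := ih cs' (!s) d (i + 1) prev xs acc hm' htail.symm (by omega) (by omega)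
          simpa [hcur] using hrec
        · rw [if_neg hq1, if_neg hq1]
          by_cases hq2 : c = '"' ∧ s = false
          · rw [if_pos hq2, if_pos hq2]
            have hrec := ih cs' s (!d) (i + 1) prev xs acc hm' htail.symm (by omega) (by omega)
            simpa [hcur] using hrec
          · rw [if_neg hq2, if_neg hq2]
            by_cases hq3 : c = ';' ∧ s = false ∧ d = false
            · rw [if_pos hq3, if_pos hq3]
              rw [bEmit.eq_def]; simp only []
              have hrec := ih cs' s d (i + 1) (i + 1) xs
                (if PySem.Str.strip (String.ofList ((xs.drop prev).take (i - prev))) = ""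
                 then acc
                 else acc ++ [PySem.Str.strip (String.ofList ((xs.drop prev).take (i - prev)))])
                hm' htail.symm (by omega) (by omega)
              simp only [PySem.List.slice_natCast]
              simpa using hrec
            · rw [if_neg hq3, if_neg hq3]
              have hrec := ih cs' s d (i + 1) prev xs acc hm' htail.symm (by omega) (by omega)
              simpa [hcur] using hrec

-- ===== VERDICT (by name: the statement is the Claim_ definition above) =====
theorem split_by_semicolons_py_spec : Claim_equal_split_by_semicolons_py := by
  intro sql _
  unfold Spec_split_by_semicolons_py split_by_semicolons_py split_by_semicolons_py_alt
  have := key sql.toList.length sql.toList false false 0 0 sql.toList [] (le_refl _) (by simp) (le_refl 0) (by simp)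
  simpa using this.symm
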